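-- pv_equiv track=rewrite | github.com/abhiksark/ArrPy | arrpy/backends/python/reduction_ops.py | _prod_python
-- ===== SOURCE A (Python) =====
-- def _prod_python(data, shape, axis=None, keepdims=False):
--     """
--     Pure Python product reduction.
--
--     Parameters
--     ----------
--     data : list
--         Flattened array data
--     shape : tuple
--         Shape of the array
--     axis : int or None
--         Axis to reduce along
--     keepdims : bool
--         Whether to keep reduced dimensions
--
--     Returns
--     -------
--     tuple
--         (result_data, result_shape)
--     """
--     # Full reduction
--     if axis is None:
--         result = 1
--         for val in data:
--             result *= val
--
--         if keepdims:
--             result_shape = tuple(1 for _ in shape)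
--             return [result], result_shape
--         else:
--             return [result], ()
--
--     # Axis reduction - simplified for 2D
--     if len(shape) == 2 and axis in [0, 1]:
--         m, n = shape
--
--         if axis == 0:  # Product along rows
--             result = []
--             for j in range(n):
--                 col_prod = 1
--                 for i in range(m):
--                     col_prod *= data[i * n + j]
--                 result.append(col_prod)
--
--             if keepdims:
--                 return result, (1, n)
--             else:
--                 return result, (n,)
--
--         else:  # axis == 1, product along columns
--             result = []
--             for i in range(m):
--                 row_prod = 1
--                 for j in range(n):
--                     row_prod *= data[i * n + j]
--                 result.append(row_prod)
--
--             if keepdims: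
--                 return result, (m, 1)
--             else:
--                 return result, (m,)
--
--     raise NotImplementedError(f"prod with axis={axis} not implemented for shape {shape}")
-- ===== SOURCE B (Python) =====
-- def _prod_python(data, shape, axis=None, keepdims=False):
--     def prod(xs):
--         p = 1
--         for v in xs:
--             p *= v
--         return p
--
--     if axis is None:
--         return [prod(data)], (tuple(1 for _ in shape) if keepdims else ())
--
--     if len(shape) == 2 and axis in [0, 1]:
--         m, n = shape
--         if axis == 0:
--             # single pass over rows, maintaining a running column-product vector
--             result = [1] * n
--             for i in range(m):
--                 row = data[i * n:(i + 1) * n]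
--                 result = [r * d for r, d in zip(result, row)]
--             return result, ((1, n) if keepdims else (n,))
--         else:
--             result = [prod(data[i * n:(i + 1) * n]) for i in range(m)]
--             return result, ((m, 1) if keepdims else (m,))
--
--     raise NotImplementedError(f"prod with axis={axis} not implemented for shape {shape}")
-- ===== Notes on version B (the rewrite author's own statement) =====
-- stated objective: alternative
-- what changed: Full reduction and axis=1 use a shared prod helper over the whole list / row slices, and axis=0 replaces the column-major nested index loop by a single row-major pass that zips a running column-product vector with each row slice.
-- outside the precondition, e.g. on _prod_python([-1, 3], (1, -1), 1, True): A returns ([1], (1, 1)), B returns ([-1], (1, 1))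
import Mathlib
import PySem

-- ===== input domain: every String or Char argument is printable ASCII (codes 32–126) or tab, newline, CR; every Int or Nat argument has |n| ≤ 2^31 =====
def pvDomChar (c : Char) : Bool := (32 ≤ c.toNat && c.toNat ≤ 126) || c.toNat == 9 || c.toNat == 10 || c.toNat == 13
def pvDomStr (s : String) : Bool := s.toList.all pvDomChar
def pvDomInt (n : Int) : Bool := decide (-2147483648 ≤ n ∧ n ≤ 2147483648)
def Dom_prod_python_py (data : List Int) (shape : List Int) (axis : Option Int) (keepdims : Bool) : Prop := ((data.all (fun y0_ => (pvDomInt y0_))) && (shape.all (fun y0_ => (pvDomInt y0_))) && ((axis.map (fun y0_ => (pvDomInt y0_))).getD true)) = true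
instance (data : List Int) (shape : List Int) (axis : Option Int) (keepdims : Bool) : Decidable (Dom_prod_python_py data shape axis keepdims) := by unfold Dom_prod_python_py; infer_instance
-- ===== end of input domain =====

-- B: shared prod helper for the full reduction and the per-row (axis=1) slices, and for axis=0 a single
-- row-major pass multiplying a running column-product vector by each row slice, instead of A's
-- column-major nested index loops.  Objective: alternative decomposition, same asymptotic cost.


-- ===== PORT A =====
-- literal transliteration of A; on inputs where A raises (NotImplementedError / IndexError,
-- excluded by Pre_ below) it returns ([], []).
def prod_python_py (data : List Int) (shape : List Int) (axis : Option Int) (keepdims : Bool) : List Int × List Int :=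
  match axis with
  | none =>
    let result := data.foldl (fun r v => r * v) 1
    if keepdims then ([result], shape.map (fun _ => (1 : Int))) else ([result], [])
  | some a =>
    match shape with
    | [m, n] =>
      if a = 0 ∨ a = 1 then
        if a = 0 then
          let result := (PySem.List.pyRange 0 n 1).foldl (fun acc j =>
            acc ++ [(PySem.List.pyRange 0 m 1).foldl
              (fun colProd i => colProd * PySem.List.pyGetD data (i * n + j) 0) 1]) []
          if keepdims then (result, [1, n]) else (result, [n])
        else
          let result := (PySem.List.pyRange 0 m 1).foldl (fun acc i =>
            acc ++ [(PySem.List.pyRange 0 n 1).foldl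
              (fun rowProd j => rowProd * PySem.List.pyGetD data (i * n + j) 0) 1]) []
          if keepdims then (result, [m, 1]) else (result, [m])
      else ([], [])
    | _ => ([], [])

-- ===== PORT B =====
-- 'prod' helper of Source B
def pvProd (xs : List Int) : Int := xs.foldl (fun p v => p * v) 1

def prod_python_py_alt (data : List Int) (shape : List Int) (axis : Option Int) (keepdims : Bool) : List Int × List Int :=
  axis.elim
    ([pvProd data], if keepdims then shape.map (fun _ => (1 : Int)) else [])
    (fun a =>
      if shape.length = 2 ∧ (a = 0 ∨ a = 1) then
        let m := shape.getD 0 0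
        let n := shape.getD 1 0
        if a = 0 then
          let result := (PySem.List.pyRange 0 m 1).foldl (fun r i =>
            List.zipWith (· * ·) r (PySem.List.slice data (some (i * n)) (some ((i + 1) * n))))
            (PySem.List.pyRepeat [1] n)
          (result, if keepdims then [1, n] else [n])
        else
          let result := (PySem.List.pyRange 0 m 1).map (fun i =>
            pvProd (PySem.List.slice data (some (i * n)) (some ((i + 1) * n))))
          (result, if keepdims then [m, 1] else [m])
      else ([], []))

-- ===== PRECONDITION & SPEC =====
-- Pre_ excludes exactly: inputs where A raises (axis given with a non-2D shape or axis ∉ {0,1} →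
-- NotImplementedError; 0 < m, 0 < n with m*n > len(data) → IndexError), and 2D shapes with
-- axis = 1, 0 < m and a negative column count n — a nonsense shape, outside the natural domain,
-- on which A's empty index loops return empty products while B's slices wrap around Python-style.
def Pre_prod_python_py (data : List Int) (shape : List Int) (axis : Option Int) (keepdims : Bool) : Prop :=
  axis = none ∨
    (shape.length = 2 ∧
      (axis.getD 0 = 0 ∨ axis.getD 0 = 1) ∧
      (0 < shape.getD 0 0 → 0 < shape.getD 1 0 →
        shape.getD 0 0 * shape.getD 1 0 ≤ (data.length : Int)) ∧
      (axis.getD 0 = 1 → 0 < shape.getD 0 0 → 0 ≤ shape.getD 1 0))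
instance (data : List Int) (shape : List Int) (axis : Option Int) (keepdims : Bool) : Decidable (Pre_prod_python_py data shape axis keepdims) := by unfold Pre_prod_python_py; infer_instance

def pvWitness_prod_python_py : List Int × List Int × Option Int × Bool := ([2, 3, 4, 5], [2, 2], some 0, false)

def Spec_prod_python_py (data : List Int) (shape : List Int) (axis : Option Int) (keepdims : Bool) (out : List Int × List Int) : Prop := out = prod_python_py_alt data shape axis keepdims
instance (data : List Int) (shape : List Int) (axis : Option Int) (keepdims : Bool) (out : List Int × List Int) : Decidable (Spec_prod_python_py data shape axis keepdims out) := by unfold Spec_prod_python_py; infer_instance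

-- ===== CLAIM (what is proved, stated in full; the proofs are below) =====
def Claim_equal_prod_python_py : Prop := ∀ (data : List Int) (shape : List Int) (axis : Option Int) (keepdims : Bool), Dom_prod_python_py data shape axis keepdims → Pre_prod_python_py data shape axis keepdims → Spec_prod_python_py data shape axis keepdims (prod_python_py data shape axis keepdims)

-- ===== LEMMAS AND PROOFS =====

-- a row slice data[i*n:(i+1)*n] is the list of entries data[i*n+j], j < n
lemma slice_row (data : List Int) (i n : Int) (hi : 0 ≤ i) (hn : 0 ≤ n)
    (hb : (i + 1) * n ≤ (data.length : Int)) :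
    PySem.List.slice data (some (i * n)) (some ((i + 1) * n))
      = (PySem.List.pyRange 0 n 1).map (fun j => PySem.List.pyGetD data (i * n + j) 0) := by
  have h0 : 0 ≤ i * n := mul_nonneg hi hn
  have h1 : 0 ≤ (i + 1) * n := mul_nonneg (by omega) hn
  have hin : i * n + n = (i + 1) * n := by ring
  rw [PySem.List.slice_toNat data h0 h1]
  apply List.ext_getElem
  · simp [PySem.List.length_pyRange_one]
    omega
  · intro k hk1 hk2
    have hkn : (k : Int) < n := by
      simp [PySem.List.length_pyRange_one] at hk2; omega
    have hidx : 0 ≤ i * n + (k : Int) := by omega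
    have hidx2 : i * n + (k : Int) < (data.length : Int) := by omega
    simp only [List.getElem_take, List.getElem_drop, List.getElem_map,
      PySem.List.getElem_pyRange_one]
    rw [show i * n + (0 + (k:Int)) = i * n + (k:Int) by ring,
       PySem.List.pyGetD_eq_getElem data 0 hidx hidx2]
    congr 1
    omega

-- folding zipWith-multiplication of equal-length rows over a start vector is a per-index fold
lemma foldl_zipWith_mul (L : List Int) (f : Int → List Int) (r0 : List Int)
    (hf : ∀ i ∈ L, (f i).length = r0.length) :
    L.foldl (fun r i => List.zipWith (· * ·) r (f i)) r0
      = (List.range r0.length).map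
          (fun j => L.foldl (fun p i => p * (f i).getD j 1) (r0.getD j 1)) := by
  induction L generalizing r0 with
  | nil =>
    simp only [List.foldl_nil]
    apply List.ext_getElem
    · simp
    · intro k h1 h2
      simp [List.getElem?_eq_getElem h1]
  | cons a L ih =>
    have ha : (f a).length = r0.length := hf a (by simp)
    have hlen : (List.zipWith (· * ·) r0 (f a)).length = r0.length := by
      simp [ha]
    simp only [List.foldl_cons]
    rw [ih _ (by intro i hi; rw [hlen]; exact hf i (by simp [hi])), hlen]
    apply List.map_congr_left
    intro j hj
    have hj' : j < r0.length := List.mem_range.mp hj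
    congr 1
    rw [List.getD_eq_getElem _ _ (by omega : j < (List.zipWith (· * ·) r0 (f a)).length),
        List.getElem_zipWith, List.getD_eq_getElem _ _ hj', List.getD_eq_getElem _ _ (by omega : j < (f a).length)]

lemma foldl_zipWith_nil (L : List Int) (f : Int → List Int) :
    L.foldl (fun r i => List.zipWith (· * ·) r (f i)) [] = [] := by
  induction L with
  | nil => rfl
  | cons a L ih => simpa using ih

lemma prod_axis1_eq (data : List Int) (m n : Int) (keepdims : Bool)
    (hbound : 0 < m → 0 < n → m * n ≤ (data.length : Int))
    (hneg : 0 < m → 0 ≤ n) :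
    prod_python_py data [m, n] (some 1) keepdims = prod_python_py_alt data [m, n] (some 1) keepdims := by
  have hres : (PySem.List.pyRange 0 m 1).foldl (fun acc i =>
        acc ++ [(PySem.List.pyRange 0 n 1).foldl
          (fun rowProd j => rowProd * PySem.List.pyGetD data (i * n + j) 0) 1]) []
      = (PySem.List.pyRange 0 m 1).map (fun i =>
          pvProd (PySem.List.slice data (some (i * n)) (some ((i + 1) * n)))) := by
    rw [PySem.List.foldl_append_singleton_eq_map]
    simp only [List.nil_append]
    apply List.map_congr_left
    intro i hi
    rw [PySem.List.mem_pyRange_one] at hi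
    have hm : 0 < m := by omega
    have hn : 0 ≤ n := hneg hm
    have hb2 : (i + 1) * n ≤ (data.length : Int) := by
      rcases lt_or_eq_of_le hn with hn' | hn'
      · exact le_trans (mul_le_mul_of_nonneg_right (by omega) hn) (hbound hm hn')
      · simp [← hn']
    rw [slice_row data i n hi.1 hn hb2]
    simp [pvProd, List.foldl_map]
  simp only [prod_python_py, prod_python_py_alt, hres]
  cases keepdims <;> norm_num

lemma prod_axis0_eq (data : List Int) (m n : Int) (keepdims : Bool)
    (hbound : 0 < m → 0 < n → m * n ≤ (data.length : Int)) :
    prod_python_py data [m, n] (some 0) keepdims = prod_python_py_alt data [m, n] (some 0) keepdims := by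
  have hres : (PySem.List.pyRange 0 n 1).foldl (fun acc j =>
        acc ++ [(PySem.List.pyRange 0 m 1).foldl
          (fun colProd i => colProd * PySem.List.pyGetD data (i * n + j) 0) 1]) []
      = (PySem.List.pyRange 0 m 1).foldl (fun r i =>
          List.zipWith (· * ·) r (PySem.List.slice data (some (i * n)) (some ((i + 1) * n))))
          (PySem.List.pyRepeat [1] n) := by
    rw [PySem.List.foldl_append_singleton_eq_map, PySem.List.pyRepeat_singleton]
    simp only [List.nil_append]
    rcases le_or_gt n 0 with hn | hn
    · rw [PySem.List.pyRange_one_eq_nil hn, Int.toNat_of_nonpos hn]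
      simp only [List.map_nil, List.replicate_zero, foldl_zipWith_nil]
    · rcases le_or_gt m 0 with hm | hm
      · rw [PySem.List.pyRange_one_eq_nil hm]
        simp only [List.foldl_nil]
        apply List.ext_getElem
        · simp [PySem.List.length_pyRange_one]
        · intro k h1 h2
          simp
      · -- 0 < m, 0 < n
        have hlen : m * n ≤ (data.length : Int) := hbound hm hn
        have hcongr := PySem.List.foldl_congr_mem (PySem.List.pyRange 0 m 1)
          (fun r i => List.zipWith (· * ·) r
            (PySem.List.slice data (some (i * n)) (some ((i + 1) * n))))
          (fun r i => List.zipWith (· * ·) r ((PySem.List.pyRange 0 n 1).map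
            (fun j => PySem.List.pyGetD data (i * n + j) 0)))
          (List.replicate n.toNat (1 : Int))
          (by
            intro acc i hi
            rw [PySem.List.mem_pyRange_one] at hi
            have hb2 : (i + 1) * n ≤ (data.length : Int) :=
              le_trans (mul_le_mul_of_nonneg_right (by omega) (le_of_lt hn)) hlen
            simp only [slice_row data i n hi.1 (le_of_lt hn) hb2])
        rw [hcongr]
        rw [foldl_zipWith_mul _ _ _ (by
            intro i hi
            simp [PySem.List.length_pyRange_one])]
        simp only [List.length_replicate]
        rw [PySem.List.pyRange_one 0 n]
        simp only [Int.sub_zero, List.map_map, Function.comp_def, Int.zero_add]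
        apply List.map_congr_left
        intro j hj
        have hj' : j < n.toNat := List.mem_range.mp hj
        have hgetD : (List.replicate n.toNat (1:Int)).getD j 1 = 1 := by
          rw [List.getD_eq_getElem _ _ (by simpa using hj'), List.getElem_replicate]
        rw [hgetD]
        apply PySem.List.foldl_congr_mem
        intro acc i hi
        rw [PySem.List.getD_map_range _ _ _ _ hj']
  simp only [prod_python_py, prod_python_py_alt, hres]
  cases keepdims <;> norm_num

-- ===== VERDICT (by name: the statement is the Claim_ definition above) =====
theorem prod_python_py_spec : Claim_equal_prod_python_py := by
  intro data shape axis keepdims _hdom hpre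
  unfold Spec_prod_python_py
  cases axis with
  | none =>
    simp only [prod_python_py, prod_python_py_alt, pvProd]
    cases keepdims <;> rfl
  | some a =>
    rcases hpre with hnone | ⟨hlen2, ha, hb, hc⟩
    · exact absurd hnone (by simp)
    · match shape, hlen2 with
      | [m, n], _ =>
        simp only [Option.getD_some, List.getD_cons_zero, List.getD_cons_succ] at ha hb hc
        rcases ha with ha | ha <;> subst ha
        · exact prod_axis0_eq data m n keepdims hb
        · exact prod_axis1_eq data m n keepdims hb (fun hm => hc rfl hm)
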